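-- pv_equiv track=rewrite | github.com/peterpei666/leetcode_python | 3628. Maximum Number of Subsequences After One Inserting.py | numOfSubsequences
-- ===== SOURCE A (Python) =====
-- def numOfSubsequences(s: str) -> int:
--     t = 0
--     for c in s:
--         if c == 'T':
--             t += 1
--     temp1, temp2, temp3 = 0, 0, 0
--     k, l = 0, 0
--     for c in s:
--         k = max(k, l * t)
--         if c == 'L':
--             l += 1
--         elif c == 'C':
--             temp1 += (l + 1) * t
--             temp2 += l * t
--             temp3 += l * (t + 1)
--         elif c == 'T':
--             t -= 1
--     return max(temp1, temp2 + k, temp3)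
-- ===== SOURCE B (Python) =====
-- def numOfSubsequences(s: str) -> int:
--     # Forward DP: classic subsequence counting of L-, LC- and LCT-subsequences.
--     cntL = cntLC = cntLCT = 0
--     for c in s:
--         if c == 'T':
--             cntLCT += cntLC
--         elif c == 'C':
--             cntLC += cntL
--         elif c == 'L':
--             cntL += 1
--     # Backward DP: count CT-pairs; evaluate the best 'C' insertion only at
--     # L positions, via the remaining-L counter and the running suffix-T count.
--     cntT = cntCT = gainC = 0
--     lrem = cntL
--     for c in reversed(s):
--         if c == 'T':
--             cntT += 1
--         elif c == 'C':
--             cntCT += cntT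
--         elif c == 'L':
--             gainC = max(gainC, lrem * cntT)
--             lrem -= 1
--     # answer = existing LCT count + best single-insertion gain
--     return cntLCT + max(cntCT, gainC, cntLC)
-- ===== Notes on version B (the rewrite author's own statement) =====
-- stated objective: alternative
-- what changed: Replaces A's single forward loop that threads temp1/temp2/temp3 and maxes a prefixL*suffixT product at every position by a classic subsequence-counting DP (forward pass accumulating counts of L-, LC- and LCT-subsequences) plus a backward DP that counts CT-pairs and evaluates the best C-insertion only at L positions via a remaining-L counter, returning the LCT count plus the max of the three gains.
import Mathlib
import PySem

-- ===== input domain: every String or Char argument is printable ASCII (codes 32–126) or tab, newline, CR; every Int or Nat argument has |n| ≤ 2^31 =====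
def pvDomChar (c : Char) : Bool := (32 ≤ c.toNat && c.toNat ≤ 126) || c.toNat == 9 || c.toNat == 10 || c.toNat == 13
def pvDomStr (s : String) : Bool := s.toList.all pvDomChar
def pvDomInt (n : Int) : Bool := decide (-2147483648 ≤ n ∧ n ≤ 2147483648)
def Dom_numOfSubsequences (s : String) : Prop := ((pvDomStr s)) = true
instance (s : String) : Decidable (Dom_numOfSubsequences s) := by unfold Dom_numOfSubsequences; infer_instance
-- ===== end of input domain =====

-- B replaces A's single loop threading temp1/temp2/temp3 and a per-position prefixL*suffixT max
-- by a forward subsequence-counting DP (counts of L-, LC- and LCT-subsequences) plus a backward DP counting CT-pairs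
-- and evaluating the best C-insertion only at L positions (objective: alternative algorithm).


-- ===== PORT A =====
-- first loop of A: count the 'T's
def pvCountStepA (t : Int) (c : Char) : Int := if c = 'T' then t + 1 else t

-- second loop of A: state (temp1, temp2, temp3, k, l, t)
def pvStepA (st : Int × Int × Int × Int × Int × Int) (c : Char) :
    Int × Int × Int × Int × Int × Int :=
  let (temp1, temp2, temp3, k, l, t) := st
  let k := max k (l * t)
  if c = 'L' then (temp1, temp2, temp3, k, l + 1, t)
  else if c = 'C' then (temp1 + (l + 1) * t, temp2 + l * t, temp3 + l * (t + 1), k, l, t)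
  else if c = 'T' then (temp1, temp2, temp3, k, l, t - 1)
  else (temp1, temp2, temp3, k, l, t)

def numOfSubsequences (s : String) : Int :=
  let t := s.toList.foldl pvCountStepA 0
  let st := s.toList.foldl pvStepA (0, 0, 0, 0, 0, t)
  max (max st.1 (st.2.1 + st.2.2.2.1)) st.2.2.1

-- ===== PORT B =====
-- forward DP of B: state (cntL, cntLC, cntLCT)
def pvFwdStepB (st : Int × Int × Int) (c : Char) : Int × Int × Int :=
  let (cntL, cntLC, cntLCT) := st
  if c = 'T' then (cntL, cntLC, cntLCT + cntLC)
  else if c = 'C' then (cntL, cntLC + cntL, cntLCT)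
  else if c = 'L' then (cntL + 1, cntLC, cntLCT)
  else (cntL, cntLC, cntLCT)

-- backward DP of B over reversed(s): state (cntT, cntCT, gainC, lrem)
def pvBwdStepB (st : Int × Int × Int × Int) (c : Char) : Int × Int × Int × Int :=
  let (cntT, cntCT, gainC, lrem) := st
  if c = 'T' then (cntT + 1, cntCT, gainC, lrem)
  else if c = 'C' then (cntT, cntCT + cntT, gainC, lrem)
  else if c = 'L' then (cntT, cntCT, max gainC (lrem * cntT), lrem - 1)
  else (cntT, cntCT, gainC, lrem)

def numOfSubsequences_alt (s : String) : Int :=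
  let f := s.toList.foldl pvFwdStepB (0, 0, 0)
  let b := s.toList.reverse.foldl pvBwdStepB (0, 0, 0, f.1)
  f.2.2 + max (max b.2.1 b.2.2.1) f.2.1

-- ===== PRECONDITION & SPEC =====
def Spec_numOfSubsequences (s : String) (out : Int) : Prop := out = numOfSubsequences_alt s
instance (s : String) (out : Int) : Decidable (Spec_numOfSubsequences s out) := by unfold Spec_numOfSubsequences; infer_instance

-- ===== CLAIM (what is proved, stated in full; the proofs are below) =====
def Claim_equal_numOfSubsequences : Prop := ∀ (s : String), Dom_numOfSubsequences s → Spec_numOfSubsequences s (numOfSubsequences s)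

-- ===== LEMMAS AND PROOFS =====

-- spec quantities, by structural recursion on the character list
def pvNT : List Char → Int
  | [] => 0
  | c :: cs => (if c = 'T' then 1 else 0) + pvNT cs

def pvNC : List Char → Int
  | [] => 0
  | c :: cs => (if c = 'C' then 1 else 0) + pvNC cs

def pvNL : List Char → Int
  | [] => 0
  | c :: cs => (if c = 'L' then 1 else 0) + pvNL cs

def pvCT : List Char → Int
  | [] => 0
  | c :: cs => (if c = 'C' then pvNT cs else 0) + pvCT cs

def pvLC : List Char → Int
  | [] => 0
  | c :: cs => (if c = 'L' then pvNC cs else 0) + pvLC cs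

def pvLCT : List Char → Int
  | [] => 0
  | c :: cs => (if c = 'L' then pvCT cs else 0) + pvLCT cs

-- best C-insertion gain, candidates only at L positions (l = #L already to the left)
def pvG (l : Int) : List Char → Int
  | [] => 0
  | c :: cs => if c = 'L' then max ((l + 1) * pvNT cs) (pvG (l + 1) cs) else pvG l cs

-- A's k quantity: max over positions of prefixL * suffixT
def pvK (l : Int) : List Char → Int
  | [] => 0
  | c :: cs => max (l * pvNT (c :: cs)) (pvK (if c = 'L' then l + 1 else l) cs)

theorem pvNT_nonneg (cs : List Char) : 0 ≤ pvNT cs := by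
  induction cs with
  | nil => simp [pvNT]
  | cons c cs ih => simp only [pvNT]; split_ifs <;> omega

theorem pvG_nonneg (l : Int) (cs : List Char) : 0 ≤ pvG l cs := by
  induction cs generalizing l with
  | nil => simp [pvG]
  | cons c cs ih =>
    simp only [pvG]
    split_ifs with h
    · exact le_trans (ih (l + 1)) (le_max_right _ _)
    · exact ih l

-- KEY: max-over-all-positions equals max-over-L-positions (prefixL nondecreasing)
theorem pvK_eq_G (cs : List Char) : ∀ l : Int, 0 ≤ l →
    pvK l cs = max (l * pvNT cs) (pvG l cs) := by
  induction cs with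
  | nil => intro l _; simp [pvK, pvG, pvNT]
  | cons c cs ih =>
    intro l hl
    by_cases hL : c = 'L'
    · subst hL
      simp only [pvK, pvG, pvNT]
      norm_num
      rw [ih (l + 1) (by omega)]
    · by_cases hT : c = 'T'
      · subst hT
        simp only [pvK, pvG, pvNT, if_neg hL]
        norm_num
        rw [ih l hl]
        have h1 : l * pvNT cs ≤ l * (1 + pvNT cs) := by nlinarith
        rw [← max_assoc, max_eq_left h1]
      · simp only [pvK, pvG, pvNT, if_neg hL, if_neg hT]
        norm_num
        rw [ih l hl]
        omega

-- invariant of A's main loop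
theorem pvA_fold (cs : List Char) : ∀ t1 t2 t3 k l : Int, 0 ≤ l → 0 ≤ k →
    cs.foldl pvStepA (t1, t2, t3, k, l, pvNT cs) =
      (t1 + pvLCT cs + (l + 1) * pvCT cs,
       t2 + pvLCT cs + l * pvCT cs,
       t3 + pvLCT cs + l * pvCT cs + pvLC cs + l * pvNC cs,
       max k (pvK l cs),
       l + pvNL cs,
       0) := by
  induction cs with
  | nil =>
    intro t1 t2 t3 k l hl hk
    simp [pvLCT, pvCT, pvLC, pvNC, pvNL, pvNT, pvK, max_eq_left hk]
  | cons c cs ih =>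
    intro t1 t2 t3 k l hl hk
    have hnt := pvNT_nonneg cs
    by_cases hL : c = 'L'
    · subst hL
      simp only [List.foldl_cons, pvStepA, pvNT, pvCT, pvLC, pvLCT, pvNC, pvNL, pvK,
        Char.reduceEq, reduceIte, zero_add]
      rw [ih t1 t2 t3 (max k (l * pvNT cs)) (l + 1) (by omega)
            (le_trans hk (le_max_left _ _)), max_assoc]
      simp only [Prod.mk.injEq]
      and_intros <;> first | trivial | ring
    · by_cases hC : c = 'C'
      · subst hC
        simp only [List.foldl_cons, pvStepA, pvNT, pvCT, pvLC, pvLCT, pvNC, pvNL, pvK,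
          Char.reduceEq, reduceIte, zero_add]
        rw [ih (t1 + (l + 1) * pvNT cs) (t2 + l * pvNT cs) (t3 + l * (pvNT cs + 1))
              (max k (l * pvNT cs)) l hl (le_trans hk (le_max_left _ _)), max_assoc]
        simp only [Prod.mk.injEq]
        and_intros <;> first | trivial | ring
      · by_cases hT : c = 'T'
        · subst hT
          simp only [List.foldl_cons, pvStepA, pvNT, pvCT, pvLC, pvLCT, pvNC, pvNL, pvK,
            Char.reduceEq, reduceIte, zero_add]
          have hstep : (1 : Int) + pvNT cs - 1 = pvNT cs := by ring
          rw [hstep,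
              ih t1 t2 t3 (max k (l * (1 + pvNT cs))) l hl
                (le_trans hk (le_max_left _ _)), max_assoc]
        · simp only [List.foldl_cons, pvStepA, pvNT, pvCT, pvLC, pvLCT, pvNC, pvNL, pvK,
            if_neg hL, if_neg hC, if_neg hT, zero_add]
          rw [ih t1 t2 t3 (max k (l * pvNT cs)) l hl (le_trans hk (le_max_left _ _)),
              max_assoc]

-- A's first loop counts the T's
theorem pvCntA (cs : List Char) : ∀ t0 : Int, cs.foldl pvCountStepA t0 = t0 + pvNT cs := by
  induction cs with
  | nil => intro t0; simp [pvNT]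
  | cons c cs ih =>
    intro t0
    simp only [List.foldl_cons, pvCountStepA, pvNT]
    rw [ih]
    split_ifs <;> omega

-- invariant of B's forward DP
theorem pvB_fwd (cs : List Char) : ∀ a b d : Int,
    cs.foldl pvFwdStepB (a, b, d) =
      (a + pvNL cs, b + pvLC cs + a * pvNC cs,
       d + pvLCT cs + b * pvNT cs + a * pvCT cs) := by
  induction cs with
  | nil => intro a b d; simp [pvNL, pvLC, pvNC, pvLCT, pvNT, pvCT]
  | cons c cs ih =>
    intro a b d
    by_cases hT : c = 'T'
    · subst hT
      simp only [List.foldl_cons, pvFwdStepB, pvNL, pvLC, pvNC, pvLCT, pvNT, pvCT,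
        Char.reduceEq, reduceIte, zero_add]
      rw [ih a b (d + b)]
      simp only [Prod.mk.injEq]
      and_intros <;> first | trivial | ring
    · by_cases hC : c = 'C'
      · subst hC
        simp only [List.foldl_cons, pvFwdStepB, pvNL, pvLC, pvNC, pvLCT, pvNT, pvCT,
          Char.reduceEq, reduceIte, zero_add]
        rw [ih a (b + a) d]
        simp only [Prod.mk.injEq]
        and_intros <;> first | trivial | ring
      · by_cases hL : c = 'L'
        · subst hL
          simp only [List.foldl_cons, pvFwdStepB, pvNL, pvLC, pvNC, pvLCT, pvNT, pvCT,
            Char.reduceEq, reduceIte, zero_add]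
          rw [ih (a + 1) b d]
          all_goals (simp only [Prod.mk.injEq]; and_intros <;> first | trivial | ring)
        · simp only [List.foldl_cons, pvFwdStepB, pvNL, pvLC, pvNC, pvLCT, pvNT, pvCT,
            if_neg hT, if_neg hC, if_neg hL, zero_add]
          rw [ih a b d]

-- invariant of B's backward DP (stated as a foldr over the unreversed list)
theorem pvB_bwd (cs : List Char) : ∀ l0 g0 : Int, 0 ≤ l0 → 0 ≤ g0 →
    cs.foldr (fun c st => pvBwdStepB st c) (0, 0, g0, l0 + pvNL cs) =
      (pvNT cs, pvCT cs, max g0 (pvG l0 cs), l0) := by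
  induction cs with
  | nil =>
    intro l0 g0 hl hg
    simp [pvNT, pvCT, pvG, pvNL, max_eq_left hg]
  | cons c cs ih =>
    intro l0 g0 hl hg
    by_cases hT : c = 'T'
    · subst hT
      simp only [List.foldr_cons, pvNT, pvCT, pvG, pvNL, Char.reduceEq, reduceIte,
        zero_add]
      rw [ih l0 g0 hl hg]
      simp [pvBwdStepB]
      ring
    · by_cases hC : c = 'C'
      · subst hC
        simp only [List.foldr_cons, pvNT, pvCT, pvG, pvNL, Char.reduceEq, reduceIte,
          zero_add]
        rw [ih l0 g0 hl hg]
        simp [pvBwdStepB]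
        ring
      · by_cases hL : c = 'L'
        · subst hL
          simp only [List.foldr_cons, pvNT, pvCT, pvG, pvNL, Char.reduceEq, reduceIte,
            zero_add]
          have hinit : l0 + (1 + pvNL cs) = (l0 + 1) + pvNL cs := by ring
          rw [hinit, ih (l0 + 1) g0 (by omega) hg]
          simp only [pvBwdStepB, Char.reduceEq, reduceIte, Prod.mk.injEq]
          and_intros <;> try first | trivial | ring
          rw [max_assoc]
          exact congrArg (max g0) (max_comm _ _)
        · simp only [List.foldr_cons, pvNT, pvCT, pvG, pvNL, if_neg hT, if_neg hC,
            if_neg hL, zero_add]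
          rw [ih l0 g0 hl hg]
          simp [pvBwdStepB, hT, hC, hL]

-- ===== VERDICT (by name: the statement is the Claim_ definition above) =====
theorem numOfSubsequences_spec : Claim_equal_numOfSubsequences := by
  intro s _
  show _ = _
  have hB := pvB_bwd s.toList 0 0 le_rfl le_rfl
  have hK := pvK_eq_G s.toList 0 le_rfl
  have hG := pvG_nonneg 0 s.toList
  simp only [zero_add] at hB
  simp only [numOfSubsequences, numOfSubsequences_alt, pvCntA s.toList 0,
    List.foldl_reverse, zero_add]
  rw [pvA_fold s.toList 0 0 0 0 0 le_rfl le_rfl, pvB_fwd s.toList 0 0 0]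
  simp only [zero_add, zero_mul, one_mul, add_zero]
  rw [hB, hK]
  simp only [zero_mul]
  omega
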